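-- pv_equiv track=rewrite | github.com/kingsj/learnstreet | Email Interpreter/email_interpret-python.py | is_valid_local
-- ===== SOURCE A (Python) =====
-- def is_valid_local(text):
--     str_len = text.__len__()
--     if str_len > 0:
--         # Can't start with a dot or an underscore
--         if (text[0] != '.' and text[0] != '_' ):
--             # Everything else should be alphabet, number or '.' or '_'
--             ctr = 0
--             while (ctr < str_len and ( (text[ctr] >= 'A' and text[ctr] <= 'Z') or (text[ctr] >= 'a' and text[ctr] <= 'z') or ( text[ctr] >= '0' and text[ctr] <= '9') or text[ctr] == '.' or text[ctr] == '_' )):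
--                 ctr += 1
--
--             if ctr == str_len:
--                 return True
--     return False
-- ===== SOURCE B (Python) =====
-- import re
--
-- _LOCAL_RE = re.compile(r'[A-Za-z0-9][A-Za-z0-9._]*')
--
-- def is_valid_local(text):
--     return _LOCAL_RE.fullmatch(text) is not None
-- ===== Notes on version B (the rewrite author's own statement) =====
-- stated objective: idiomatic
-- what changed: Replaced the manual index-based while-loop scan with a single compiled regular-expression fullmatch of [A-Za-z0-9][A-Za-z0-9._]*.
import Mathlib
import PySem

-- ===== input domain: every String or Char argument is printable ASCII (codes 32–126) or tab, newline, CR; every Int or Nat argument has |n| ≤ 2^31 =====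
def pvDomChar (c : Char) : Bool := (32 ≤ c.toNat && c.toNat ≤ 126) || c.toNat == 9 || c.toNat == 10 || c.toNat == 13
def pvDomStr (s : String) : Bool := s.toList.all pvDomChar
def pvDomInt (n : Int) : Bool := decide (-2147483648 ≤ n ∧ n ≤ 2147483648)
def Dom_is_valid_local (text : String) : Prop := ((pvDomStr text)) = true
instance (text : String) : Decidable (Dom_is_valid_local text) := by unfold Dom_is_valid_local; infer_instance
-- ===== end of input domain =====

-- B replaces A's manual index-scanning while loop by a single regex fullmatch ([A-Za-z0-9][A-Za-z0-9._]*); same return value.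

-- ===== PORT A =====
-- character test exactly as A's while-condition writes it
def pvValidA (c : Char) : Bool :=
  ('A' ≤ c && c ≤ 'Z') || ('a' ≤ c && c ≤ 'z') || ('0' ≤ c && c ≤ '9') || c == '.' || c == '_'

-- the while loop: advance ctr while the current char is valid; result "ctr == str_len"
def pvWhileA : List Char → Bool
  | [] => true
  | c :: cs => if pvValidA c then pvWhileA cs else false

def is_valid_local (text : String) : Bool :=
  let cs := text.toList
  if cs.length > 0 then
    match cs with
    | [] => false
    | c0 :: _ =>
      if c0 ≠ '.' ∧ c0 ≠ '_' then
        if pvWhileA cs then true else false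
      else false
  else false

-- ===== PORT B =====
-- regex first class [A-Za-z0-9]
def pvFirstB (c : Char) : Bool :=
  ('A' ≤ c && c ≤ 'Z') || ('a' ≤ c && c ≤ 'z') || ('0' ≤ c && c ≤ '9')

-- regex tail class [A-Za-z0-9._]
def pvRestB (c : Char) : Bool := pvFirstB c || c == '.' || c == '_'

-- fullmatch of [A-Za-z0-9][A-Za-z0-9._]* against the whole string
def is_valid_local_alt (text : String) : Bool :=
  match text.toList with
  | [] => false
  | c :: cs => pvFirstB c && cs.all pvRestB

-- ===== PRECONDITION & SPEC =====
def Spec_is_valid_local (text : String) (out : Bool) : Prop := out = is_valid_local_alt text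
instance (text : String) (out : Bool) : Decidable (Spec_is_valid_local text out) := by unfold Spec_is_valid_local; infer_instance

-- ===== CLAIM (what is proved, stated in full; the proofs are below) =====
def Claim_equal_is_valid_local : Prop := ∀ (text : String), Dom_is_valid_local text → Spec_is_valid_local text (is_valid_local text)

-- ===== LEMMAS AND PROOFS =====

lemma pvValidA_eq_restB (c : Char) : pvValidA c = pvRestB c := by
  simp [pvValidA, pvRestB, pvFirstB, Bool.or_assoc]

lemma pvWhileA_eq_all (cs : List Char) : pvWhileA cs = cs.all pvValidA := by
  induction cs with
  | nil => rfl
  | cons c cs ih => by_cases h : pvValidA c <;> simp [pvWhileA, h, ih]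

lemma pvFirstB_of_valid (c : Char) (h1 : c ≠ '.') (h2 : c ≠ '_') (hv : pvValidA c = true) :
    pvFirstB c = true := by
  simp [pvValidA, pvFirstB] at hv ⊢
  rcases hv with ((((h | h) | h) | h) | h) <;> first
    | exact Or.inl (Or.inl h) | exact Or.inl (Or.inr h) | exact Or.inr h
    | exact absurd h h1 | exact absurd h h2

-- ===== VERDICT (by name: the statement is the Claim_ definition above) =====
theorem is_valid_local_spec : Claim_equal_is_valid_local := by
  intro text _
  unfold Spec_is_valid_local is_valid_local is_valid_local_alt
  cases hcs : text.toList with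
  | nil => simp
  | cons c cs =>
    simp only [List.length_cons, Nat.zero_lt_succ, if_true, gt_iff_lt]
    by_cases hdot : c = '.'
    · subst hdot; simp [pvFirstB]
    · by_cases hund : c = '_'
      · subst hund; simp [pvFirstB]
      · simp only [hdot, hund, ne_eq, not_false_iff, and_self, if_true]
        rw [pvWhileA_eq_all]
        simp only [List.all_cons]
        by_cases hv : pvValidA c = true
        · have hf := pvFirstB_of_valid c hdot hund hv
          have hall : cs.all pvValidA = cs.all pvRestB := by
            rw [funext pvValidA_eq_restB]
          simp only [hv, hf, hall, Bool.true_and]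
          cases cs.all pvRestB <;> rfl
        · have hf : pvFirstB c = false := by
            cases hfb : pvFirstB c
            · rfl
            · exact absurd (by simp [pvValidA, pvFirstB] at hfb ⊢; tauto) hv
          simp [Bool.not_eq_true] at hv
          simp [hv, hf]
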